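-- pv_equiv track=rewrite | github.com/liuwei464976266/mygit | hpfgf.py | getRepeatCardsMax
-- ===== SOURCE A (Python) =====
-- def getRepeatCardsMax(cards,num,cardType = 0):
--     frequencies = {}
--     frequencies_list = []
--     temList = []
--     ranks = [i[3] for i in cards]
--     for rank in ranks:
--         if rank not in frequencies:
--             frequencies[rank] = 1
--         else:
--             frequencies[rank] += 1
--     for key,frequency in frequencies.items():
--         if frequency == num:
--             for i in range(0,frequency):
--                 frequencies_list.append(key)
--         elif frequency % num == 0 and num == 2:
--             for i in range(0,frequency):
--                 frequencies_list.append(key)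
--         elif frequency == 4 and num == 3 and cardType == 13:
--             for i in range(0, frequency):
--                 frequencies_list.append(key)
--         else:
--             for i in range(0, frequency):
--                 temList.append(key)
--     if cardType in (12,13,17):
--         maxCard = max(frequencies_list)
--         frequencies_list = []
--         frequencies_list.append(maxCard)
--         temList = []
--     frequencies_list.sort(reverse=True)
--     temList.sort(reverse=True)
--     frequencies_list += temList
--     return frequencies_list
-- ===== SOURCE B (Python) =====
-- def getRepeatCardsMax(cards, num, cardType=0):
--     ranks = [c[3] for c in cards]
--     freq = {}
--     for r in ranks:
--         freq[r] = freq.get(r, 0) + 1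
--
--     def secondary(r):
--         f = freq[r]
--         return not (f == num or (f % num == 0 and num == 2)
--                     or (f == 4 and num == 3 and cardType == 13))
--
--     if cardType in (12, 13, 17):
--         return [max(r for r in freq if not secondary(r))]
--     # one stable two-pass sort of the raw rank list: descending by rank,
--     # then stably by class (primary ranks before secondary ranks)
--     out = sorted(ranks, reverse=True)
--     out.sort(key=lambda r: 1 if secondary(r) else 0)
--     return out
-- ===== Notes on version B (the rewrite author's own statement) =====
-- stated objective: alternative
-- what changed: B never partitions the cards into two lists: it sorts the raw rank list once descending and then stably re-sorts it by class (primary before secondary), letting sort stability produce A's partition-sort-concatenate result; for cardType in {12,13,17} it takes the max over the primary distinct ranks directly without any expansion.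
import Mathlib
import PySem

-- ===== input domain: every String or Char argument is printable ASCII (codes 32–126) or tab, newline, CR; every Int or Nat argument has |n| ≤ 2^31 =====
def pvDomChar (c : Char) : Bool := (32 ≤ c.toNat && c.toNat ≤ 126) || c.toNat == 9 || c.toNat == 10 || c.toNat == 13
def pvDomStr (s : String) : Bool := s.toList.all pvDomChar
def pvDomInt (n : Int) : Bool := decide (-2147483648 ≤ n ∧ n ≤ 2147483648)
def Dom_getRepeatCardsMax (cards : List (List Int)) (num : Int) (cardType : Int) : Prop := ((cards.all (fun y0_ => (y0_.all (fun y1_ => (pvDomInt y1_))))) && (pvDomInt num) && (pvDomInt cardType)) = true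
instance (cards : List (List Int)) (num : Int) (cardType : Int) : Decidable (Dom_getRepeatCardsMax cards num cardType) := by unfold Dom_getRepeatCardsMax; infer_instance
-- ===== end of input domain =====

-- B replaces A's partition-into-two-lists-and-sort-each with one stable two-pass sort of the raw rank
-- list (descending by rank, then stably by class), and for the special cardTypes takes the max over the
-- primary distinct ranks directly, with no expansion.

-- ===== PORT A =====
def getRepeatCardsMax (cards : List (List Int)) (num : Int) (cardType : Int) : List Int :=
  let ranks := cards.map (fun i => (PySem.List.pyGet? i 3).getD 0)
  let frequencies : PySem.Dict Int Int :=
    ranks.foldl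
      (fun d rank => if d.contains rank then d.modify rank 0 (· + 1) else d.insert rank 1)
      PySem.Dict.empty
  let st : List Int × List Int :=
    frequencies.items.foldl
      (fun st kv =>
        if kv.2 == num then
          ((PySem.List.pyRange 0 kv.2).foldl (fun fl _ => fl ++ [kv.1]) st.1, st.2)
        else if PySem.Int.mod kv.2 num == 0 && num == 2 then
          ((PySem.List.pyRange 0 kv.2).foldl (fun fl _ => fl ++ [kv.1]) st.1, st.2)
        else if kv.2 == 4 && num == 3 && cardType == 13 then
          ((PySem.List.pyRange 0 kv.2).foldl (fun fl _ => fl ++ [kv.1]) st.1, st.2)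
        else
          (st.1, (PySem.List.pyRange 0 kv.2).foldl (fun tl _ => tl ++ [kv.1]) st.2))
      ([], [])
  let st2 : List Int × List Int :=
    if cardType == 12 || cardType == 13 || cardType == 17 then
      ([(PySem.List.max? st.1 (fun x => x)).getD 0], [])   -- max([]) raises in Python: excluded by Pre_
    else st
  PySem.List.sorted st2.1 (fun x => x) true ++ PySem.List.sorted st2.2 (fun x => x) true

-- ===== PORT B =====
def pvSecondary (num cardType f : Int) : Bool :=
  !(f == num || (PySem.Int.mod f num == 0 && num == 2) || (f == 4 && num == 3 && cardType == 13))

def getRepeatCardsMax_alt (cards : List (List Int)) (num : Int) (cardType : Int) : List Int :=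
  let ranks := cards.map (fun c => (PySem.List.pyGet? c 3).getD 0)
  let freq : PySem.Dict Int Int :=
    ranks.foldl (fun d r => d.insert r (d.getD r 0 + 1)) PySem.Dict.empty
  if cardType == 12 || cardType == 13 || cardType == 17 then
    [(PySem.List.max?
        (freq.keys.filter (fun r => !pvSecondary num cardType (freq.getD r 0)))
        (fun x => x)).getD 0]   -- max(empty generator) raises in Python: excluded by Pre_
  else
    PySem.List.sorted (PySem.List.sorted ranks (fun x => x) true)
      (fun r => if pvSecondary num cardType (freq.getD r 0) then (1 : Int) else 0) false

-- ===== PRECONDITION & SPEC =====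
-- Pre_ excludes exactly the inputs where Python A raises: a card shorter than 4 entries (IndexError at i[3]),
-- num == 0 with a nonempty hand (ZeroDivisionError at frequency % num), and a cardType in {12,13,17} with no
-- primary rank (ValueError from max of an empty list).
def Pre_getRepeatCardsMax (cards : List (List Int)) (num : Int) (cardType : Int) : Prop :=
  (∀ c ∈ cards, 4 ≤ c.length)
  ∧ (cards = [] ∨ num ≠ 0)
  ∧ ((cardType = 12 ∨ cardType = 13 ∨ cardType = 17) →
      ∃ c ∈ cards,
        (((cards.map (fun i => (PySem.List.pyGet? i 3).getD 0)).count
            ((PySem.List.pyGet? c 3).getD 0) : Int) = num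
         ∨ (PySem.Int.mod ((cards.map (fun i => (PySem.List.pyGet? i 3).getD 0)).count
              ((PySem.List.pyGet? c 3).getD 0) : Int) num = 0 ∧ num = 2)
         ∨ (((cards.map (fun i => (PySem.List.pyGet? i 3).getD 0)).count
              ((PySem.List.pyGet? c 3).getD 0) : Int) = 4 ∧ num = 3 ∧ cardType = 13)))

instance (cards : List (List Int)) (num : Int) (cardType : Int) : Decidable (Pre_getRepeatCardsMax cards num cardType) := by unfold Pre_getRepeatCardsMax; infer_instance

def pvWitness_getRepeatCardsMax : List (List Int) × Int × Int := ([[1, 2, 3, 5], [0, 0, 0, 5], [0, 0, 0, 9]], 2, 0)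

def Spec_getRepeatCardsMax (cards : List (List Int)) (num : Int) (cardType : Int) (out : List Int) : Prop := out = getRepeatCardsMax_alt cards num cardType
instance (cards : List (List Int)) (num : Int) (cardType : Int) (out : List Int) : Decidable (Spec_getRepeatCardsMax cards num cardType out) := by unfold Spec_getRepeatCardsMax; infer_instance

-- ===== CLAIM (what is proved, stated in full; the proofs are below) =====
def Claim_equal_getRepeatCardsMax : Prop := ∀ (cards : List (List Int)) (num : Int) (cardType : Int), Dom_getRepeatCardsMax cards num cardType → Pre_getRepeatCardsMax cards num cardType → Spec_getRepeatCardsMax cards num cardType (getRepeatCardsMax cards num cardType)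

-- ===== LEMMAS AND PROOFS =====

def pvPrimary (num cardType f : Int) : Bool :=
  f == num || (PySem.Int.mod f num == 0 && num == 2) || (f == 4 && num == 3 && cardType == 13)

theorem pv_primary_eq (num cardType f : Int) :
    pvPrimary num cardType f = !pvSecondary num cardType f := by
  simp [pvPrimary, pvSecondary]

theorem pv_dictA_eq_counter (l : List Int) :
    l.foldl (fun d rank => if d.contains rank then d.modify rank 0 (· + 1) else d.insert rank 1)
      PySem.Dict.empty = PySem.Dict.counter l := by
  rw [PySem.Dict.counter_eq_foldl]
  apply PySem.List.foldl_congr_mem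
  intro acc x _
  by_cases h : acc.contains x = true
  · simp [h, PySem.Dict.modify]
  · simp only [Bool.not_eq_true] at h
    simp [h, PySem.Dict.modify, PySem.Dict.getD_of_not_contains]

theorem pv_split_fold (l : List (Int × Int)) (P : Int × Int → Bool) (E : Int × Int → List Int)
    (a b : List Int) :
    l.foldl (fun st kv => if P kv then (st.1 ++ E kv, st.2) else (st.1, st.2 ++ E kv)) (a, b)
      = (a ++ (l.filter P).flatMap E, b ++ (l.filter (fun kv => !P kv)).flatMap E) := by
  induction l generalizing a b with
  | nil => simp
  | cons kv t ih =>
    cases hP : P kv <;> simp [hP, ih]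

theorem pv_classify (num cardType : Int) (items : List (Int × Int)) :
    items.foldl (fun st kv =>
        if kv.2 == num then
          ((PySem.List.pyRange 0 kv.2).foldl (fun fl _ => fl ++ [kv.1]) st.1, st.2)
        else if PySem.Int.mod kv.2 num == 0 && num == 2 then
          ((PySem.List.pyRange 0 kv.2).foldl (fun fl _ => fl ++ [kv.1]) st.1, st.2)
        else if kv.2 == 4 && num == 3 && cardType == 13 then
          ((PySem.List.pyRange 0 kv.2).foldl (fun fl _ => fl ++ [kv.1]) st.1, st.2)
        else
          (st.1, (PySem.List.pyRange 0 kv.2).foldl (fun tl _ => tl ++ [kv.1]) st.2))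
      (([] : List Int), ([] : List Int))
    = ((items.filter (fun kv => pvPrimary num cardType kv.2)).flatMap
         (fun kv => (PySem.List.pyRange 0 kv.2).map (fun _ => kv.1)),
       (items.filter (fun kv => !pvPrimary num cardType kv.2)).flatMap
         (fun kv => (PySem.List.pyRange 0 kv.2).map (fun _ => kv.1))) := by
  rw [PySem.List.foldl_congr_mem _ _
      (fun st kv => if pvPrimary num cardType kv.2
        then (st.1 ++ (PySem.List.pyRange 0 kv.2).map (fun _ => kv.1), st.2)
        else (st.1, st.2 ++ (PySem.List.pyRange 0 kv.2).map (fun _ => kv.1))) _ ?_]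
  · simpa using pv_split_fold items (fun kv => pvPrimary num cardType kv.2)
      (fun kv => (PySem.List.pyRange 0 kv.2).map (fun _ => kv.1)) [] []
  · intro acc kv _
    simp only [PySem.List.foldl_append_singleton_eq_map (fun _ => kv.1)]
    cases h1 : (kv.2 == num) <;>
      cases h2 : (PySem.Int.mod kv.2 num == 0 && num == 2) <;>
      cases h3 : (kv.2 == 4 && num == 3 && cardType == 13) <;>
      simp [pvPrimary, h1, h2, h3]

theorem pv_sorted_rev_eq_of_perm_of_pairwise_ge (xs ys : List Int) (hp : ys.Perm xs)
    (hpw : ys.Pairwise (fun a b => b ≤ a)) :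
    PySem.List.sorted xs (fun x => x) true = ys := by
  apply PySem.List.eq_of_perm_of_pairwise_le_of_injective (key := fun x : Int => -x)
    (fun a b h => by simpa using h)
  · exact (PySem.List.sorted_perm xs _ true).trans hp.symm
  · exact (PySem.List.sorted_pairwise_rev xs _).imp (by intro a b h; simpa using h)
  · exact hpw.imp (by intro a b h; simpa using h)

theorem pv_sortedDesc_congr_perm (X Y : List Int) (h : X.Perm Y) :
    PySem.List.sorted X (fun x => x) true = PySem.List.sorted Y (fun x => x) true :=
  pv_sorted_rev_eq_of_perm_of_pairwise_ge X _
    ((PySem.List.sorted_perm Y _ true).trans h.symm)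
    (PySem.List.sorted_pairwise_rev Y _)

theorem pv_filter_sortedDesc (L : List Int) (q : Int → Bool) :
    (PySem.List.sorted L (fun x => x) true).filter q
      = PySem.List.sorted (L.filter q) (fun x => x) true :=
  (pv_sorted_rev_eq_of_perm_of_pairwise_ge (L.filter q) _
    ((PySem.List.sorted_perm L _ true).filter q)
    ((PySem.List.sorted_pairwise_rev L _).filter q)).symm

theorem pv_max_flatMap (K : List Int) (e : Int → List Int)
    (he : ∀ r, ∀ x ∈ e r, x = r) (hne : ∀ r ∈ K, r ∈ e r) (h0 : K ≠ []) :
    PySem.List.max? (K.flatMap e) (fun x => x) = PySem.List.max? K (fun x => x) := by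
  obtain ⟨m2, hm2⟩ : ∃ m, PySem.List.max? K (fun x => x) = some m := by
    cases h : PySem.List.max? K (fun x => x) with
    | none => exact (h0 ((PySem.List.max?_eq_none_iff K _).mp h)).elim
    | some m => exact ⟨m, rfl⟩
  have hm2K : m2 ∈ K := PySem.List.max?_mem hm2
  have hm2fl : m2 ∈ K.flatMap e := List.mem_flatMap.mpr ⟨m2, hm2K, hne m2 hm2K⟩
  obtain ⟨m1, hm1⟩ : ∃ m, PySem.List.max? (K.flatMap e) (fun x => x) = some m := by
    cases h : PySem.List.max? (K.flatMap e) (fun x => x) with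
    | none => exact (List.ne_nil_of_mem hm2fl ((PySem.List.max?_eq_none_iff _ _).mp h)).elim
    | some m => exact ⟨m, rfl⟩
  have hm1K : m1 ∈ K := by
    obtain ⟨r, hr, hx⟩ := List.mem_flatMap.mp (PySem.List.max?_mem hm1)
    rw [he r m1 hx]; exact hr
  rw [hm1, hm2]
  have h12 : m1 ≤ m2 := PySem.List.max?_isMax hm2 m1 hm1K
  have h21 : m2 ≤ m1 := PySem.List.max?_isMax hm1 m2 hm2fl
  exact congrArg some (le_antisymm h12 h21)

theorem pv_pyRange_map_const (c : Nat) (r : Int) :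
    (PySem.List.pyRange 0 (c : Int)).map (fun _ => r) = List.replicate c r := by
  rcases Nat.eq_zero_or_pos c with h | h
  · subst h; simp [PySem.List.pyRange]
  · simp [PySem.List.pyRange, h, Function.comp_def, List.map_const']

theorem pv_sum_single (M : List Int) (hnd : M.Nodup) (x : Int) (g : Int → Nat) :
    (M.map (fun r => if x = r then g r else 0)).sum = if x ∈ M then g x else 0 := by
  induction M with
  | nil => simp
  | cons r M' ih =>
    obtain ⟨hr, hnd'⟩ := List.nodup_cons.mp hnd
    by_cases hx : x = r
    · subst hx
      simp [ih hnd', hr]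
    · simp [hx, ih hnd', List.mem_cons]

theorem pv_flatMap_perm_filter (l : List Int) (q : Int → Bool) :
    (((PySem.Set.ofList l).filter q).flatMap
        (fun r => (PySem.List.pyRange 0 ((l.count r : Int))).map (fun _ => r))).Perm
      (l.filter q) := by
  have hrepl : ∀ r : Int, (PySem.List.pyRange 0 ((l.count r : Int))).map (fun _ => r)
      = List.replicate (l.count r) r := fun r => pv_pyRange_map_const (l.count r) r
  simp only [hrepl]
  rw [List.perm_iff_count]
  intro x
  rw [List.count_flatMap]
  have hnd : ((PySem.Set.ofList l).filter q).Nodup := (PySem.Set.nodup_ofList l).filter q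
  have hsum : ((((PySem.Set.ofList l).filter q)).map
      (List.count x ∘ fun r => List.replicate (l.count r) r)).sum
      = if x ∈ (PySem.Set.ofList l).filter q then l.count x else 0 := by
    have := pv_sum_single ((PySem.Set.ofList l).filter q) hnd x (fun r => l.count r)
    rw [← this]
    apply congrArg
    apply List.map_congr_left
    intro r _
    simp only [Function.comp_apply, List.count_replicate]
    by_cases hxr : x = r
    · subst hxr; simp
    · simp [hxr, Ne.symm hxr]
  rw [hsum]
  by_cases hq : q x = true
  · by_cases hmem : x ∈ l
    · rw [if_pos (List.mem_filter.mpr ⟨(PySem.Set.mem_ofList l x).mpr hmem, hq⟩),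
        List.count_filter hq]
    · rw [if_neg (fun h => hmem ((PySem.Set.mem_ofList l x).mp (List.mem_filter.mp h).1))]
      rw [List.count_filter hq, List.count_eq_zero.mpr hmem]
  · simp only [Bool.not_eq_true] at hq
    have h1 : x ∉ (PySem.Set.ofList l).filter q := fun h => by
      have := (List.mem_filter.mp h).2; rw [hq] at this; exact Bool.false_ne_true this
    rw [if_neg h1, Eq.comm, List.count_eq_zero]
    intro h
    have := (List.mem_filter.mp h).2; rw [hq] at this; exact Bool.false_ne_true this

theorem pv_insertBy_append (before : Int → Int → Bool) (x : Int) (A B : List Int)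
    (h : ∀ y ∈ A, before x y = false) :
    PySem.List.insertBy before x (A ++ B) = A ++ PySem.List.insertBy before x B := by
  induction A with
  | nil => simp
  | cons a A' ih =>
    have ha : before x a = false := h a (List.mem_cons_self)
    simp only [List.cons_append, PySem.List.insertBy, ha, Bool.false_eq_true, if_false]
    exact congrArg (a :: ·) (ih (fun y hy => h y (List.mem_cons_of_mem a hy)))

theorem pv_stable_partition (p : Int → Bool) (L A B : List Int)
    (hA : ∀ y ∈ A, p y = false) (hB : ∀ y ∈ B, p y = true) :
    L.foldl (fun acc x => PySem.List.insertBy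
        (fun a b => decide ((if p a then (1 : Int) else 0) < (if p b then (1 : Int) else 0)))
        x acc) (A ++ B)
      = (A ++ L.filter (fun r => !p r)) ++ (B ++ L.filter p) := by
  induction L generalizing A B with
  | nil => simp
  | cons x L ih =>
    simp only [List.foldl_cons]
    by_cases hx : p x = true
    · have hfalse : ∀ y ∈ A ++ B,
          (decide ((if p x then (1 : Int) else 0) < (if p y then (1 : Int) else 0))) = false := by
        intro y _
        cases hpy : p y <;> simp [hx]
      rw [PySem.List.insertBy_of_forall_not_before _ _ _ hfalse, List.append_assoc,
        ih A (B ++ [x]) hA (by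
          intro y hy
          rcases List.mem_append.mp hy with h | h
          · exact hB y h
          · rw [List.mem_singleton.mp h]; exact hx)]
      simp [hx]
    · have hx' : p x = false := by simpa using hx
      have hins : PySem.List.insertBy
          (fun a b => decide ((if p a then (1 : Int) else 0) < (if p b then (1 : Int) else 0)))
          x (A ++ B) = (A ++ [x]) ++ B := by
        rw [pv_insertBy_append _ _ _ _ (by intro y hy; simp [hx', hA y hy])]
        cases B with
        | nil => simp [PySem.List.insertBy]
        | cons b B' =>
          have hb : p b = true := hB b (List.mem_cons_self)
          simp [PySem.List.insertBy, hx', hb]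
      rw [hins, ih (A ++ [x]) B (by
          intro y hy
          rcases List.mem_append.mp hy with h | h
          · exact hA y h
          · rw [List.mem_singleton.mp h]; exact hx') hB]
      simp [hx']

theorem pv_sorted_bool_key (L : List Int) (p : Int → Bool) :
    PySem.List.sorted L (fun r => if p r then (1 : Int) else 0) false
      = L.filter (fun r => !p r) ++ L.filter p := by
  rw [PySem.List.sorted_eq_foldl_insertBy]
  have := pv_stable_partition p L [] [] (by simp) (by simp)
  simpa using this

-- ===== VERDICT (by name: the statement is the Claim_ definition above) =====
theorem getRepeatCardsMax_spec : Claim_equal_getRepeatCardsMax := by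
  intro cards num cardType _ hpre
  obtain ⟨-, -, hspecial⟩ := hpre
  unfold Spec_getRepeatCardsMax
  unfold getRepeatCardsMax getRepeatCardsMax_alt
  simp only [pv_dictA_eq_counter, PySem.Dict.foldl_insert_getD_add_one_eq_counter, pv_classify,
    PySem.Dict.items_counter, PySem.Dict.keys_counter, PySem.Dict.getD_counter,
    List.filter_map, List.flatMap_map]
  set ranks := cards.map (fun i => (PySem.List.pyGet? i 3).getD 0) with hranks
  set K := PySem.Set.ofList ranks with hK
  simp only [Function.comp_def, pv_primary_eq, Bool.not_not]
  cases hct : (cardType == 12 || cardType == 13 || cardType == 17) with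
  | true =>
    simp only [reduceIte]
    have hctP : cardType = 12 ∨ cardType = 13 ∨ cardType = 17 := by
      have := hct; simp only [Bool.or_eq_true, beq_iff_eq] at this; tauto
    obtain ⟨c, hc, hcond⟩ := hspecial hctP
    set q : Int → Bool := fun k => !pvSecondary num cardType ((ranks.count k : Int)) with hq
    have hr0 : (PySem.List.pyGet? c 3).getD 0 ∈ K := by
      rw [hK, PySem.Set.mem_ofList]
      exact hranks ▸ List.mem_map_of_mem hc
    have hq0 : q ((PySem.List.pyGet? c 3).getD 0) = true := by
      simp only [hq, pvSecondary, Bool.not_not, Bool.or_eq_true, Bool.and_eq_true, beq_iff_eq]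
      tauto
    have hmem : (PySem.List.pyGet? c 3).getD 0 ∈ K.filter q :=
      List.mem_filter.mpr ⟨hr0, hq0⟩
    have h0 : K.filter q ≠ [] := List.ne_nil_of_mem hmem
    have he : ∀ r, ∀ x ∈ (PySem.List.pyRange 0 ((ranks.count r : Int))).map (fun _ => r), x = r := by
      intro r x hx
      obtain ⟨a, -, h⟩ := List.mem_map.mp hx
      simpa using h.symm
    have hne : ∀ r ∈ K.filter q,
        r ∈ (PySem.List.pyRange 0 ((ranks.count r : Int))).map (fun _ => r) := by
      intro r hr
      have hrK : r ∈ ranks := by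
        have := (List.mem_filter.mp hr).1
        rwa [hK, PySem.Set.mem_ofList] at this
      have hcnt : (0 : Int) < (ranks.count r : Int) := by
        exact_mod_cast List.count_pos_iff.mpr hrK
      rw [PySem.List.pyRange_one_cons hcnt]
      simp
    rw [pv_max_flatMap (K.filter q) _ he hne h0]
    rw [pv_sorted_rev_eq_of_perm_of_pairwise_ge _ _ (List.Perm.refl _)
      (List.pairwise_singleton _ _)]
    rfl
  | false =>
    rw [if_neg Bool.false_ne_true, if_neg Bool.false_ne_true]
    rw [pv_sorted_bool_key, pv_filter_sortedDesc, pv_filter_sortedDesc]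
    congr 1
    · exact pv_sortedDesc_congr_perm _ _
        (pv_flatMap_perm_filter ranks (fun r => !pvSecondary num cardType ((ranks.count r : Int))))
    · exact pv_sortedDesc_congr_perm _ _
        (pv_flatMap_perm_filter ranks (fun r => pvSecondary num cardType ((ranks.count r : Int))))
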